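-- pv_equiv track=rewrite | github.com/rkdtndk99/PS_study_smwu | Week1/rkdtndk99/신고 결과 받기.py | solution
-- ===== SOURCE A (Python) =====
-- def solution(id_list, report, k):
--     # 받을 이메일 개수
--     answer = {id: 0 for id in id_list}
--
--     # 리스트 내 중복되는 값 무시하기 위해서
--     report = list(set(report))
--     r = {id: [] for id in id_list}
--
--     for i in range(len(report)):
--         user, warn = report[i].split()
--         r[warn].append(user)
--
--     for item, value in r.items():
--         if len(value) >= k:
--             for key in value:
--                 answer[key] += 1
--
--     return list(answer.values())
-- ===== SOURCE B (Python) =====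
-- def solution(id_list, report, k):
--     # Dedup once, pre-split each report into a (user, warn) pair.
--     pairs = [tuple(rep.split()) for rep in set(report)]
--
--     # Count distinct reporters per reported user.
--     count = {i: 0 for i in id_list}
--     for user, warn in pairs:
--         count[warn] += 1
--
--     # One flat pass: each pair whose target reached the threshold earns its reporter a mail.
--     answer = {i: 0 for i in id_list}
--     for user, warn in pairs:
--         if count[warn] >= k:
--             answer[user] += 1
--
--     return list(answer.values())
-- ===== Notes on version B (the rewrite author's own statement) =====
-- stated objective: alternative
-- what changed: Replaces A's dict of per-target reporter lists with its nested increment loop by a flat list of pre-split (user, warn) pairs from the deduped reports, a reporter-count table per target, and a single flat second pass incrementing answer[user] when count[warn] reaches k.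
-- outside the precondition, e.g. on solution(['a', 'b'], ['z a'], 2): A returns [0, 0], B returns [0, 0]
import Mathlib
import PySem

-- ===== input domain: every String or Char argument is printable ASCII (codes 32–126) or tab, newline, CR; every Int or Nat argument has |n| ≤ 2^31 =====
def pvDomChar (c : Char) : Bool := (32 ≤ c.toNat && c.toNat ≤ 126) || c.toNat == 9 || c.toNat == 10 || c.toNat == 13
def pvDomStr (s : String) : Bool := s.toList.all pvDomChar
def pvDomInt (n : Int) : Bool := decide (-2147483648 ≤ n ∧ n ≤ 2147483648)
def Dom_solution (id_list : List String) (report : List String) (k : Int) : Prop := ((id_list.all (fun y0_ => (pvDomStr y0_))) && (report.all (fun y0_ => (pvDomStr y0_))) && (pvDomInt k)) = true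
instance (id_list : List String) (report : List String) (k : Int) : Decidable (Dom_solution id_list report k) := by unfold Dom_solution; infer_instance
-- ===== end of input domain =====

-- B replaces A's per-user lists of reporters (dict of lists + nested increment loop) by a flat
-- list of pre-split (user, warn) pairs with a count dict and a single second pass; same cost class, different decomposition.


-- ===== PORT A =====
def solution (id_list : List String) (report : List String) (k : Int) : List Int :=
  -- answer = {id: 0 for id in id_list}
  let answer : PySem.Dict String Int :=
    id_list.foldl (fun d id => d.insert id 0) PySem.Dict.empty
  -- report = list(set(report))
  let report1 : List String := PySem.Set.ofList report
  -- r = {id: [] for id in id_list}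
  let r : PySem.Dict String (List String) :=
    id_list.foldl (fun d id => d.insert id []) PySem.Dict.empty
  -- for i in range(len(report)): user, warn = report[i].split(); r[warn].append(user)
  let r :=
    (PySem.List.pyRange 0 (PySem.List.len report1)).foldl
      (fun r i =>
        match PySem.Str.split₀ (PySem.List.pyGetD report1 i "") with
        | [user, warn] => r.modify warn [] (fun v => v ++ [user])
        | _ => r)  -- unpacking raises ValueError in Python: outside Pre_
      r
  -- for item, value in r.items(): if len(value) >= k: for key in value: answer[key] += 1
  let answer :=
    r.items.foldl
      (fun ans p =>
        if k ≤ PySem.List.len p.2 then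
          p.2.foldl (fun a key => a.modify key 0 (fun x => x + 1)) ans
        else ans)
      answer
  -- return list(answer.values())
  answer.values

-- ===== PORT B =====
-- 'user, warn = tuple(rep.split())': components 0 and 1 of the split
-- (Python raises ValueError unless it has exactly two tokens: outside Pre_)
def splitPair (rep : String) : String × String :=
  let ts := PySem.Str.split₀ rep
  (ts.headD "", (ts.drop 1).headD "")

def solution_alt (id_list : List String) (report : List String) (k : Int) : List Int :=
  -- pairs = [tuple(rep.split()) for rep in set(report)]
  let pairs : List (String × String) := (PySem.Set.ofList report).map splitPair
  -- count = {i: 0 for i in id_list}; for user, warn in pairs: count[warn] += 1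
  let count : PySem.Dict String Int :=
    id_list.foldl (fun d id => d.insert id 0) PySem.Dict.empty
  let count := pairs.foldl (fun d p => d.modify p.2 0 (fun x => x + 1)) count
  -- answer = {i: 0 for i in id_list}; for user, warn in pairs: if count[warn] >= k: answer[user] += 1
  let answer : PySem.Dict String Int :=
    id_list.foldl (fun d id => d.insert id 0) PySem.Dict.empty
  let answer :=
    pairs.foldl
      (fun d p => if k ≤ count.getD p.2 0 then d.modify p.1 0 (fun x => x + 1) else d)
      answer
  -- return list(answer.values())
  answer.values

-- ===== PRECONDITION & SPEC =====
-- Pre_ = the problem's stated domain: every report is "user warn" with both ids in id_list.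
-- This excludes inputs on which A raises (ValueError on a report without exactly two tokens,
-- KeyError on a reported id outside id_list or on a reporter of a threshold-reaching id outside
-- id_list) and, narrower than that, also the corner where A still returns: an unknown reporter
-- whose target stays below the threshold (B returns the same value there; see claim cites).
def Pre_solution (id_list : List String) (report : List String) (k : Int) : Prop :=
  ∀ rep ∈ report,
    (PySem.Str.split₀ rep).length = 2 ∧ ∀ t ∈ PySem.Str.split₀ rep, t ∈ id_list
instance (id_list : List String) (report : List String) (k : Int) : Decidable (Pre_solution id_list report k) := by unfold Pre_solution; infer_instance

def pvWitness_solution : List String × List String × Int :=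
  (["muzi", "frodo", "apeach"], ["muzi frodo", "apeach frodo", "muzi frodo"], 2)

def Spec_solution (id_list : List String) (report : List String) (k : Int) (out : List Int) : Prop := out = solution_alt id_list report k
instance (id_list : List String) (report : List String) (k : Int) (out : List Int) : Decidable (Spec_solution id_list report k out) := by unfold Spec_solution; infer_instance

-- ===== CLAIM (what is proved, stated in full; the proofs are below) =====
def Claim_equal_solution : Prop := ∀ (id_list : List String) (report : List String) (k : Int), Dom_solution id_list report k → Pre_solution id_list report k → Spec_solution id_list report k (solution id_list report k)

-- ===== LEMMAS AND PROOFS =====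

lemma pv_getD_foldl_insert_const {ν : Type} (l : List String) (d : PySem.Dict String ν) (x : String) (v : ν)
    (h : d.getD x v = v) : (l.foldl (fun d id => d.insert id v) d).getD x v = v := by
  induction l generalizing d with
  | nil => exact h
  | cons a l ih =>
    simp only [List.foldl_cons]
    refine ih _ ?_
    rw [PySem.Dict.getD_insert]
    split <;> simp [h]

lemma pv_add_of_mem (s : PySem.Set String) (a : String) (h : a ∈ s) : PySem.Set.add s a = s := by
  unfold PySem.Set.add PySem.Set.contains
  simp
  exact h

lemma pv_update_eq_self (s : PySem.Set String) (l : List String) (h : ∀ x ∈ l, x ∈ s) :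
    PySem.Set.update s l = s := by
  induction l generalizing s with
  | nil => rfl
  | cons a l ih =>
    unfold PySem.Set.update at *
    simp only [List.foldl_cons]
    rw [pv_add_of_mem s a (h a (by simp))]
    exact ih s (fun x hx => h x (by simp [hx]))

lemma pv_sum_pick_zero (ws : List String) (a : String) (ha : a ∉ ws) (g : String → Nat) :
    (ws.map (fun w => if a = w then g w else 0)).sum = 0 := by
  induction ws with
  | nil => rfl
  | cons w ws ih =>
    simp only [List.map_cons, List.sum_cons]
    have h1 : ¬ (a = w) := by rintro rfl; exact ha (by simp)
    rw [if_neg h1, ih (fun h => ha (by simp [h]))]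

lemma pv_sum_pick (ws : List String) (hnd : ws.Nodup) (a : String) (ha : a ∈ ws) (g : String → Nat) :
    (ws.map (fun w => if a = w then g w else 0)).sum = g a := by
  induction ws with
  | nil => simp at ha
  | cons w ws ih =>
    simp only [List.map_cons, List.sum_cons]
    by_cases hw : a = w
    · subst hw
      rw [if_pos rfl, pv_sum_pick_zero ws a (by simp at hnd; exact hnd.1) g]
      omega
    · rw [if_neg hw, Nat.zero_add]
      exact ih (by simp at hnd; exact hnd.2) (by rcases ha with _ | h; exact absurd rfl hw; assumption)

lemma pv_partition (ws : List String) (hnd : ws.Nodup) (c : String × String → Bool)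
    (l : List (String × String)) (hmem : ∀ p ∈ l, p.2 ∈ ws) :
    (ws.map (fun w => l.countP (fun p => (p.2 == w) && c p))).sum = l.countP c := by
  induction l with
  | nil => simp
  | cons p l ih =>
    have hp : p.2 ∈ ws := hmem p (by simp)
    have hl : ∀ q ∈ l, q.2 ∈ ws := fun q hq => hmem q (by simp [hq])
    simp only [List.countP_cons]
    rw [List.sum_map_add, ih hl]
    congr 1
    have hfun : (fun (w : String) => if (p.2 == w && c p) = true then 1 else 0)
        = (fun (w : String) => if p.2 = w then (if c p = true then 1 else 0) else 0) := by
      funext w; by_cases h1 : p.2 = w <;> by_cases h2 : c p <;> simp [h1, h2]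
    rw [hfun]
    by_cases hc : c p
    · simp only [hc, if_true]
      exact pv_sum_pick ws hnd p.2 hp (fun _ => 1)
    · simp [hc]

lemma pv_sum_filter (l : List String) (q : String → Bool) (g : String → Nat) :
    ((l.filter q).map g).sum = (l.map (fun w => if q w then g w else 0)).sum := by
  induction l with
  | nil => rfl
  | cons w l ih =>
    by_cases h : q w <;> simp [h, ih]

lemma pv_A_loop_getD (k : Int) (items : List (String × List String)) (ans : PySem.Dict String Int) (x : String) :
    (items.foldl (fun ans p => if k ≤ PySem.List.len p.2 then p.2.foldl (fun a key => a.modify key 0 (fun v => v + 1)) ans else ans) ans).getD x 0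
      = ans.getD x 0 + (((items.filter (fun p => decide (k ≤ PySem.List.len p.2))).flatMap (fun p => p.2)).count x : Int) := by
  induction items generalizing ans with
  | nil => simp
  | cons p items ih =>
    simp only [List.foldl_cons, List.filter_cons]
    by_cases h : k ≤ PySem.List.len p.2
    · rw [if_pos h, ih, PySem.Dict.getD_foldl_modify_add_one,
        if_pos (show decide (k ≤ PySem.List.len p.2) = true by simpa using h), List.flatMap_cons, List.count_append]
      push_cast
      ring
    · rw [if_neg h, ih, if_neg (show ¬ decide (k ≤ PySem.List.len p.2) = true by simpa using h)]

lemma pv_A_loop_keys (k : Int) (items : List (String × List String)) (ans : PySem.Dict String Int)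
    (s : List String) (hans : ans.keys = s) (h : ∀ p ∈ items, ∀ u ∈ p.2, u ∈ s) :
    (items.foldl (fun ans p => if k ≤ PySem.List.len p.2 then p.2.foldl (fun a key => a.modify key 0 (fun v => v + 1)) ans else ans) ans).keys = s := by
  induction items generalizing ans with
  | nil => exact hans
  | cons p items ih =>
    simp only [List.foldl_cons]
    refine ih _ ?_ (fun q hq u hu => h q (by simp [hq]) u hu)
    by_cases hk : k ≤ PySem.List.len p.2
    · rw [if_pos hk, PySem.Dict.keys_foldl_modify, hans,
        pv_update_eq_self s p.2 (fun u hu => h p (by simp) u hu)]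
    · rw [if_neg hk]; exact hans

lemma pv_B_loop_getD (C : String × String → Prop) [DecidablePred C] (l : List (String × String))
    (ans : PySem.Dict String Int) (x : String) :
    (l.foldl (fun d p => if C p then d.modify p.1 0 (fun v => v + 1) else d) ans).getD x 0
      = ans.getD x 0 + (((l.filter (fun p => decide (C p))).map (fun p => p.1)).count x : Int) := by
  induction l generalizing ans with
  | nil => simp
  | cons p l ih =>
    simp only [List.foldl_cons, List.filter_cons]
    by_cases h : C p
    · rw [if_pos h, ih]
      have h1 := PySem.Dict.getD_foldl_modify_add_one [p.1] ans x
      simp only [List.foldl_cons, List.foldl_nil] at h1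
      rw [h1, if_pos (show decide (C p) = true by simpa using h)]
      simp only [List.map_cons, List.count_cons, List.count_nil]
      push_cast
      ring
    · rw [if_neg h, ih, if_neg (show ¬ decide (C p) = true by simpa using h)]

lemma pv_B_loop_keys (C : String × String → Prop) [DecidablePred C] (l : List (String × String))
    (ans : PySem.Dict String Int) (s : List String) (hans : ans.keys = s) (h : ∀ p ∈ l, p.1 ∈ s) :
    (l.foldl (fun d p => if C p then d.modify p.1 0 (fun v => v + 1) else d) ans).keys = s := by
  induction l generalizing ans with
  | nil => exact hans
  | cons p l ih =>
    simp only [List.foldl_cons]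
    refine ih _ ?_ (fun q hq => h q (by simp [hq]))
    by_cases hk : C p
    · rw [if_pos hk]
      have h1 := PySem.Dict.keys_foldl_modify [p.1] 0 (fun _ _ v => v + 1) ans
      simp only [List.foldl_cons, List.foldl_nil] at h1
      rw [h1, hans, pv_update_eq_self s [p.1] (by simpa using h p (by simp))]
    · rw [if_neg hk]; exact hans

def pvPairs (report : List String) : List (String × String) := (PySem.Set.ofList report).map splitPair
def pvCnt (report : List String) (w : String) : Nat := (pvPairs report).countP (fun q => q.2 == w)
def pvForm (id_list : List String) (report : List String) (k : Int) : List Int :=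
  (PySem.Set.ofList id_list).map
    (fun x => 0 + ((pvPairs report).countP
      (fun p => (p.1 == x) && decide (k ≤ (pvCnt report p.2 : Int))) : Int))

lemma pv_B_form (id_list : List String) (report : List String) (k : Int)
    (hu : ∀ p ∈ pvPairs report, p.1 ∈ id_list) :
    solution_alt id_list report k = pvForm id_list report k := by
  unfold solution_alt pvForm
  set ans0 : PySem.Dict String Int := id_list.foldl (fun d id => d.insert id 0) PySem.Dict.empty with hans0
  set cdict := ((PySem.Set.ofList report).map splitPair).foldl (fun d p => d.modify p.2 0 (fun x => x + 1)) ans0 with hcdict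
  have hg0 : ∀ x : String, ans0.getD x 0 = 0 := fun x =>
    pv_getD_foldl_insert_const id_list PySem.Dict.empty x 0 (PySem.Dict.getD_empty x 0)
  have hkeys0 : ans0.keys = PySem.Set.ofList id_list := by
    rw [hans0, PySem.Dict.keys_foldl_insert]
    rfl
  have hcount : ∀ w : String, cdict.getD w 0 = (pvCnt report w : Int) := by
    intro w
    rw [hcdict, ← List.foldl_map (f := fun p : String × String => p.2)
        (g := fun (d : PySem.Dict String Int) x => d.modify x 0 (fun v => v + 1)),
      PySem.Dict.getD_foldl_modify_add_one, hg0, List.count_eq_countP, List.countP_map]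
    simp only [pvCnt, pvPairs, List.countP_map, Int.zero_add]
    rfl
  have hkeysB : (((PySem.Set.ofList report).map splitPair).foldl
      (fun d p => if k ≤ cdict.getD p.2 0 then d.modify p.1 0 (fun x => x + 1) else d) ans0).keys
      = PySem.Set.ofList id_list := by
    refine pv_B_loop_keys _ _ ans0 _ hkeys0 ?_
    intro p hp
    exact (PySem.Set.mem_ofList id_list p.1).2 (hu p hp)
  rw [PySem.Dict.values_eq_map_keys _ (by rw [hkeysB]; exact PySem.Set.nodup_ofList id_list) 0, hkeysB]
  refine List.map_congr_left ?_
  intro x hx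
  rw [pv_B_loop_getD (fun p => k ≤ cdict.getD p.2 0) _ ans0 x, hg0]
  congr 1
  rw [List.count_eq_countP, List.countP_map, List.countP_filter]
  show (↑(List.countP (fun p => (p.1 == x) && decide (k ≤ cdict.getD p.2 0)) (pvPairs report)) : Int) = _
  congr 1
  apply List.countP_congr
  intro p _
  rw [hcount p.2]

lemma pv_if_term (l : List (String × String)) (q : String → Bool) (x w : String) :
    (if q w = true then l.countP (fun p => (p.1 == x) && (p.2 == w)) else 0)
      = l.countP (fun p => (p.2 == w) && ((p.1 == x) && q p.2)) := by
  by_cases h : q w = true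
  · rw [if_pos h]
    apply List.countP_congr
    intro p _
    by_cases h2 : p.2 = w
    · simp [h2, h]
    · simp [h2]
  · rw [if_neg h]
    symm
    rw [List.countP_eq_zero]
    intro p _
    by_cases h2 : p.2 = w
    · simp [h2]
      intro _
      simpa using h
    · simp [h2]


lemma pv_A_count (S : List String) (hnd : S.Nodup) (l : List (String × String))
    (hmem : ∀ p ∈ l, p.2 ∈ S) (k : Int) (x : String) :
    (((S.map (fun w => (w, (l.filter (fun p => p.2 == w)).map (fun p => p.1)))).filter
        (fun p => decide (k ≤ PySem.List.len p.2))).flatMap (fun p => p.2)).count x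
      = l.countP (fun p => (p.1 == x) && decide (k ≤ ((l.countP (fun q => q.2 == p.2)) : Int))) := by
  rw [List.filter_map, List.flatMap_def, List.map_map, List.count_flatten, List.map_map,
    pv_sum_filter]
  simp only [Function.comp_def]
  rw [show (fun w => if decide (k ≤ PySem.List.len (List.map (fun p => p.1)
        (List.filter (fun p => p.2 == w) l))) = true
      then List.count x (List.map (fun p => p.1) (List.filter (fun p => p.2 == w) l)) else 0)
      = (fun w => l.countP (fun p => (p.2 == w) && ((p.1 == x)
          && decide (k ≤ ((l.countP (fun q => q.2 == p.2)) : Int))))) from ?_]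
  · exact pv_partition S hnd _ l hmem
  funext w
  have h1 : decide (k ≤ PySem.List.len (List.map (fun p => p.1)
        (List.filter (fun p => p.2 == w) l)))
      = decide (k ≤ ((l.countP (fun q => q.2 == w)) : Int)) := by
    simp only [PySem.List.len, List.length_map, List.countP_eq_length_filter]
  have h2 : List.count x (List.map (fun p => p.1) (List.filter (fun p => p.2 == w) l))
      = l.countP (fun p => (p.1 == x) && (p.2 == w)) := by
    simp only [List.count_eq_countP, List.countP_map, List.countP_filter]
    rfl
  rw [h1, h2]
  exact pv_if_term l (fun ww => decide (k ≤ ((l.countP (fun q => q.2 == ww)) : Int))) x w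

lemma pv_A_form (id_list : List String) (report : List String) (k : Int)
    (hsplit : ∀ rep ∈ (PySem.Set.ofList report : List String),
      PySem.Str.split₀ rep = [(splitPair rep).1, (splitPair rep).2])
    (hu : ∀ p ∈ pvPairs report, p.1 ∈ id_list)
    (hw : ∀ p ∈ pvPairs report, p.2 ∈ id_list) :
    solution id_list report k = pvForm id_list report k := by
  show (solution id_list report k) = _
  simp only [solution, pvForm]
  set ans0 : PySem.Dict String Int := id_list.foldl (fun d id => d.insert id 0) PySem.Dict.empty with hans0
  set r0 : PySem.Dict String (List String) := id_list.foldl (fun d id => d.insert id []) PySem.Dict.empty with hr0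
  have hg0 : ∀ x : String, ans0.getD x 0 = 0 := fun x =>
    pv_getD_foldl_insert_const id_list PySem.Dict.empty x 0 (PySem.Dict.getD_empty x 0)
  have hgr0 : ∀ w : String, r0.getD w [] = [] := fun w =>
    pv_getD_foldl_insert_const id_list PySem.Dict.empty w [] (PySem.Dict.getD_empty w [])
  have hkeys0 : ans0.keys = PySem.Set.ofList id_list := by
    rw [hans0, PySem.Dict.keys_foldl_insert]; rfl
  have hkeysr0 : r0.keys = PySem.Set.ofList id_list := by
    rw [hr0, PySem.Dict.keys_foldl_insert]; rfl
  -- step 1: range-indexed loop = loop over the deduped report list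
  rw [PySem.List.foldl_pyRange_pyGetD (PySem.Set.ofList report) ""
      (fun r s => match PySem.Str.split₀ s with
        | [user, warn] => r.modify warn [] (fun v => v ++ [user])
        | _ => r) r0 (le_refl 0)]
  simp only [Int.toNat_zero, List.drop_zero]
  -- step 2: under Pre_, the match always takes the two-token branch
  rw [PySem.List.foldl_congr_mem _ _
      (fun r rep => r.modify (splitPair rep).2 [] (fun v => v ++ [(splitPair rep).1])) r0
      (fun acc rep hrep => by rw [hsplit rep hrep])]
  set rA := (PySem.Set.ofList report).foldl
      (fun r rep => r.modify (splitPair rep).2 [] (fun v => v ++ [(splitPair rep).1])) r0 with hrA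
  have hkeysA : rA.keys = PySem.Set.ofList id_list := by
    rw [hrA, PySem.Dict.keys_foldl_modify_key _ (fun rep => (splitPair rep).2) [] _ r0, hkeysr0,
      pv_update_eq_self]
    intro u hu2
    rcases List.mem_map.1 hu2 with ⟨rep, hrep, rfl⟩
    exact (PySem.Set.mem_ofList id_list _).2 (hw (splitPair rep) (List.mem_map.2 ⟨rep, hrep, rfl⟩))
  have hgetD : ∀ w : String, rA.getD w []
      = ((pvPairs report).filter (fun p => p.2 == w)).map (fun p => p.1) := by
    intro w
    rw [hrA, ← List.foldl_map (f := fun rep => ((splitPair rep).2, (splitPair rep).1))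
        (g := fun (d : PySem.Dict String (List String)) q => d.modify q.1 [] (fun v => v ++ [q.2])),
      PySem.Dict.getD_foldl_modify_append, hgr0]
    rw [List.nil_append,
      show (fun rep => ((splitPair rep).2, (splitPair rep).1))
        = ((fun p : String × String => (p.2, p.1)) ∘ splitPair) from rfl,
      ← List.map_map, List.filter_map, List.map_map]
    rfl
  have hnodA : rA.keys.Nodup := by rw [hkeysA]; exact PySem.Set.nodup_ofList id_list
  have hitems : rA.items = (PySem.Set.ofList id_list).map
      (fun w => (w, ((pvPairs report).filter (fun p => p.2 == w)).map (fun p => p.1))) := by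
    rw [PySem.Dict.items_eq_map_keys rA hnodA [], hkeysA]
    exact List.map_congr_left (fun w _ => by rw [hgetD w])
  rw [hitems]
  have hkeysF : (((PySem.Set.ofList id_list).map
      (fun w => (w, ((pvPairs report).filter (fun p => p.2 == w)).map (fun p => p.1)))).foldl
      (fun ans p => if k ≤ PySem.List.len p.2 then
        p.2.foldl (fun a key => a.modify key 0 (fun x => x + 1)) ans else ans) ans0).keys
      = PySem.Set.ofList id_list := by
    refine pv_A_loop_keys k _ ans0 _ hkeys0 ?_
    intro p hp u hu2
    rcases List.mem_map.1 hp with ⟨w, _, rfl⟩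
    rcases List.mem_map.1 hu2 with ⟨q, hq, rfl⟩
    exact (PySem.Set.mem_ofList id_list _).2 (hu q (List.mem_of_mem_filter hq))
  rw [PySem.Dict.values_eq_map_keys _
    (by rw [hkeysF]; exact PySem.Set.nodup_ofList id_list) 0, hkeysF]
  refine List.map_congr_left ?_
  intro x hx
  rw [pv_A_loop_getD, hg0]
  congr 1
  exact_mod_cast pv_A_count (PySem.Set.ofList id_list) (PySem.Set.nodup_ofList id_list)
    (pvPairs report) (fun p hp => (PySem.Set.mem_ofList id_list p.2).2 (hw p hp)) k x

-- ===== VERDICT (by name: the statement is the Claim_ definition above) =====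
theorem solution_spec : Claim_equal_solution := by
  intro id_list report k _ hpre
  unfold Spec_solution
  have hps : ∀ rep ∈ (PySem.Set.ofList report : List String),
      PySem.Str.split₀ rep = [(splitPair rep).1, (splitPair rep).2] ∧
      (splitPair rep).1 ∈ id_list ∧ (splitPair rep).2 ∈ id_list := by
    intro rep hrep
    obtain ⟨hlen, hmem⟩ := hpre rep ((PySem.Set.mem_ofList report rep).1 hrep)
    obtain ⟨u, w, hsp⟩ := List.length_eq_two.1 hlen
    have hpair : splitPair rep = (u, w) := by simp [splitPair, hsp]
    refine ⟨by rw [hsp, hpair], ?_, ?_⟩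
    · rw [hpair]; exact hmem u (by rw [hsp]; simp)
    · rw [hpair]; exact hmem w (by rw [hsp]; simp)
  have hu : ∀ p ∈ pvPairs report, p.1 ∈ id_list := by
    intro p hp
    rcases List.mem_map.1 hp with ⟨rep, hrep, rfl⟩
    exact (hps rep hrep).2.1
  have hw : ∀ p ∈ pvPairs report, p.2 ∈ id_list := by
    intro p hp
    rcases List.mem_map.1 hp with ⟨rep, hrep, rfl⟩
    exact (hps rep hrep).2.2
  rw [pv_A_form id_list report k (fun rep h => (hps rep h).1) hu hw,
    pv_B_form id_list report k hu]
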